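-- pv_equiv track=rewrite | github.com/bgribble/mfp | mfp/gui/collision.py | poly_project_minmax
-- ===== SOURCE A (Python) =====
-- def point_dot_product(p_1, p_2):
--     return p_1[0] * p_2[0] + p_1[1] * p_2[1]
--
-- def poly_project_minmax(poly, normal):
--     minval = None
--     maxval = None
--
--     for point in poly:
--         projval = point_dot_product(point, normal)
--         if minval is None or projval < minval:
--             minval = projval
--         if maxval is None or projval > maxval:
--             maxval = projval
--
--     return (minval, maxval)
-- ===== SOURCE B (Python) =====
-- def poly_project_minmax(poly, normal):
--     if not poly:
--         return (None, None)
--     projections = sorted(p[0] * normal[0] + p[1] * normal[1] for p in poly)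
--     return (projections[0], projections[-1])
-- ===== Notes on version B (the rewrite author's own statement) =====
-- stated objective: alternative
-- what changed: Replaces A's single-pass min/max tracking loop with two Optional accumulators by sorting the projection values once and reading the extremes off the ends of the sorted list.
import Mathlib
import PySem

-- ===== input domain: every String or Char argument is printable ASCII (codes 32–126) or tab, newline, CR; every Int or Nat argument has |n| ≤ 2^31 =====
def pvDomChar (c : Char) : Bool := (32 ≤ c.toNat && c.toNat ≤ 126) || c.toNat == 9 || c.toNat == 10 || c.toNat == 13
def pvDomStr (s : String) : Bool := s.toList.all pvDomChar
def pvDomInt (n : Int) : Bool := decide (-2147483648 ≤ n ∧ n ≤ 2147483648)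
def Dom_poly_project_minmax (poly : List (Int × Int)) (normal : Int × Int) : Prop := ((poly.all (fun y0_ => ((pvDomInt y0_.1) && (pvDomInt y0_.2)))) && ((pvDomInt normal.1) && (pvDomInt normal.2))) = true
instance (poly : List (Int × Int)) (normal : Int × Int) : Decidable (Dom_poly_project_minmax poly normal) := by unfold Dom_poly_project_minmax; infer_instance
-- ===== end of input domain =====

-- ===== PORT A =====
-- B differs from A by algorithm: A tracks min/max in one loop; B sorts the projections and reads the ends.
def pmStep (normal : Int × Int) (st : Option Int × Option Int) (point : Int × Int) : Option Int × Option Int :=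
  let projval := point.1 * normal.1 + point.2 * normal.2
  let minval := match st.1 with
    | none => some projval
    | some m => if projval < m then some projval else some m
  let maxval := match st.2 with
    | none => some projval
    | some m => if projval > m then some projval else some m
  (minval, maxval)

def poly_project_minmax (poly : List (Int × Int)) (normal : Int × Int) : Option Int × Option Int :=
  poly.foldl (pmStep normal) (none, none)

-- ===== PORT B =====
def poly_project_minmax_alt (poly : List (Int × Int)) (normal : Int × Int) : Option Int × Option Int :=
  if poly = [] then (none, none)
  else
    let projections := PySem.List.sorted (poly.map (fun p => p.1 * normal.1 + p.2 * normal.2)) (fun x => x) false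
    (PySem.List.pyGet? projections 0, PySem.List.pyGet? projections (-1))

-- ===== PRECONDITION & SPEC =====
def Spec_poly_project_minmax (poly : List (Int × Int)) (normal : Int × Int) (out : Option Int × Option Int) : Prop := out = poly_project_minmax_alt poly normal
instance (poly : List (Int × Int)) (normal : Int × Int) (out : Option Int × Option Int) : Decidable (Spec_poly_project_minmax poly normal out) := by unfold Spec_poly_project_minmax; infer_instance

-- ===== CLAIM (what is proved, stated in full; the proofs are below) =====
def Claim_equal_poly_project_minmax : Prop := ∀ (poly : List (Int × Int)) (normal : Int × Int), Dom_poly_project_minmax poly normal → Spec_poly_project_minmax poly normal (poly_project_minmax poly normal)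

-- ===== LEMMAS AND PROOFS =====

theorem pmStep_some (normal : Int × Int) (t : List (Int × Int)) :
    ∀ (a b : Int), t.foldl (pmStep normal) (some a, some b) =
      (some ((t.map (fun p => p.1 * normal.1 + p.2 * normal.2)).foldl min a),
       some ((t.map (fun p => p.1 * normal.1 + p.2 * normal.2)).foldl max b)) := by
  induction t with
  | nil => intro a b; simp
  | cons x t ih =>
      intro a b
      have h1 : (if x.1 * normal.1 + x.2 * normal.2 < a then some (x.1 * normal.1 + x.2 * normal.2) else some a)
          = some (min a (x.1 * normal.1 + x.2 * normal.2)) := by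
        rcases lt_or_ge (x.1 * normal.1 + x.2 * normal.2) a with h | h
        · simp [min_eq_right h.le, h]
        · simp [min_eq_left h, not_lt.mpr h]
      have h2 : (if x.1 * normal.1 + x.2 * normal.2 > b then some (x.1 * normal.1 + x.2 * normal.2) else some b)
          = some (max b (x.1 * normal.1 + x.2 * normal.2)) := by
        rcases lt_or_ge b (x.1 * normal.1 + x.2 * normal.2) with h | h
        · simp [max_eq_right h.le, h]
        · simp [max_eq_left h, not_lt.mpr h]
      simp only [List.foldl_cons, List.map_cons, pmStep, h1, h2, ih]

-- everything in a (≤)-pairwise list is ≤ its last element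
theorem le_getLast_of_pairwise (s : List Int) (hp : s.Pairwise (· ≤ ·)) :
    ∀ y ∈ s, ∀ (h : s ≠ []), y ≤ s.getLast h := by
  induction s with
  | nil => intro y hy; simp at hy
  | cons a t ih =>
      intro y hy h
      rcases List.pairwise_cons.mp hp with ⟨ha, ht⟩
      cases t with
      | nil => simp at hy; simp [hy, List.getLast]
      | cons b u =>
          have hlast : (a :: b :: u).getLast h = (b :: u).getLast (by simp) := by
            simp [List.getLast]
          rw [hlast]
          rcases List.mem_cons.mp hy with rfl | hyt
          · exact le_trans (ha _ (List.getLast_mem _)) (le_refl _)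
          · exact ih ht y hyt (by simp)

-- head of the sorted projections is the running-min, its last is the running-max
theorem sorted_ends (x : Int) (t : List Int) :
    (PySem.List.pyGet? (PySem.List.sorted (x :: t) (fun y => y) false) 0,
     PySem.List.pyGet? (PySem.List.sorted (x :: t) (fun y => y) false) (-1)) =
      (some (t.foldl min x), some (t.foldl max x)) := by
  set s := PySem.List.sorted (x :: t) (fun y => y) false with hs
  have hne : s ≠ [] := by
    rw [hs]; simp [Ne, PySem.List.sorted_eq_nil_iff]
  obtain ⟨m, t', hcons⟩ := List.exists_cons_of_ne_nil hne
  -- min part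
  have hmin? : PySem.List.min? (x :: t) (fun y => y) = some (t.foldl min x) :=
    PySem.List.min?_id_cons x t
  have hMmem : t.foldl min x ∈ (x :: t) := PySem.List.min?_mem hmin?
  have hMmin : ∀ y ∈ (x :: t), t.foldl min x ≤ y := by
    intro y hy; exact PySem.List.min?_isMin hmin? y hy
  have hmlem : ∀ y ∈ (x :: t), m ≤ y := by
    intro y hy
    exact PySem.List.key_head_sorted_le _ _ (by rw [← hs]; exact hcons) y hy
  have hm_mem : m ∈ (x :: t) := by
    have : m ∈ s := by rw [hcons]; exact List.mem_cons_self
    exact (PySem.List.mem_sorted _ _ _ _).mp this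
  have hmin_eq : m = t.foldl min x :=
    le_antisymm (hmlem _ hMmem) (hMmin _ hm_mem)
  -- max part
  have hmax? : PySem.List.max? (x :: t) (fun y => y) = some (t.foldl max x) :=
    PySem.List.max?_id_cons x t
  have hXmem : t.foldl max x ∈ (x :: t) := PySem.List.max?_mem hmax?
  have hXmax : ∀ y ∈ (x :: t), y ≤ t.foldl max x := by
    intro y hy; exact PySem.List.max?_isMax hmax? y hy
  have hpw : s.Pairwise (· ≤ ·) := by
    have := PySem.List.sorted_pairwise (xs := x :: t) (key := fun y => y)
    simpa [hs] using this
  set L := s.getLast hne with hL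
  have hL_mem : L ∈ (x :: t) := (PySem.List.mem_sorted _ _ _ _).mp (List.getLast_mem hne)
  have hLmax : ∀ y ∈ (x :: t), y ≤ L := by
    intro y hy
    exact le_getLast_of_pairwise s hpw y ((PySem.List.mem_sorted _ _ _ _).mpr hy) hne
  have hmax_eq : L = t.foldl max x :=
    le_antisymm (hXmax _ hL_mem) (hLmax _ hXmem)
  have h0 : PySem.List.pyGet? s 0 = some m := by
    rw [hcons]; exact PySem.List.pyGet?_zero_cons m t'
  have h1 : PySem.List.pyGet? s (-1) = some L := by
    rw [PySem.List.pyGet?_neg_one, hL, List.getLast?_eq_some_getLast]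
  rw [h0, h1, hmin_eq, hmax_eq]

-- ===== VERDICT (by name: the statement is the Claim_ definition above) =====
theorem poly_project_minmax_spec : Claim_equal_poly_project_minmax := by
  intro poly normal _
  unfold Spec_poly_project_minmax poly_project_minmax poly_project_minmax_alt
  cases poly with
  | nil => simp
  | cons x t =>
      simp only [List.foldl_cons, List.map_cons, pmStep, pmStep_some, if_neg (List.cons_ne_nil x t)]
      rw [← sorted_ends]
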